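-- pv_equiv track=rewrite | github.com/DEV-ZERO-cloud/MySalesAdministrator | src/backend/app/logic/methods/get_amount_products.py | extraer_cantidad_productos
-- ===== SOURCE A (Python) =====
-- def extraer_cantidad_productos(estado):
--     numero = ""
--     if not isinstance(estado, str):
--         estado = str(estado)  # Convertir a cadena
--     for i in estado:
--         if i.isnumeric():
--             numero +=i
--     n_productos = int(numero) if numero else 0
--     return n_productos+1
-- ===== SOURCE B (Python) =====
-- def extraer_cantidad_productos(estado):
--     if not isinstance(estado, str):
--         estado = str(estado)  # Convertir a cadena
--     num = 0
--     for i in estado: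
--         if i.isnumeric():
--             num = num * 10 + int(i)
--     return num + 1
-- ===== Notes on version B (the rewrite author's own statement) =====
-- stated objective: simpler
-- what changed: Instead of concatenating the digits into a string and parsing it with int() at the end, B accumulates the number arithmetically (num = num*10 + int(i)) in the same single pass, so no intermediate string and no final parse exist.
import Mathlib
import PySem

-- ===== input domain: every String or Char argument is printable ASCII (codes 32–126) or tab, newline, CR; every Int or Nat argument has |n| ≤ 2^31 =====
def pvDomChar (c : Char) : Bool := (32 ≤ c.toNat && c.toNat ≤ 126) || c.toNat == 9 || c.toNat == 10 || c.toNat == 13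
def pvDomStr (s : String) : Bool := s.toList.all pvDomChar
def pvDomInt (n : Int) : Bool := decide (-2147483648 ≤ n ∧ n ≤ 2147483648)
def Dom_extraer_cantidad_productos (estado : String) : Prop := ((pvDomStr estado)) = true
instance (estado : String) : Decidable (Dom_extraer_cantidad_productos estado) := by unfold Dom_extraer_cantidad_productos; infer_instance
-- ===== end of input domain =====

-- B replaces A's digit-string concatenation + final int() parse by an arithmetic accumulator
-- (num = num*10 + int(i)) in the same pass: simpler, no intermediate string.


-- ===== PORT A =====
-- int(numero) where numero is a NONEMPTY string of ASCII digits '0'-'9' only (every kept char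
-- satisfied i.isnumeric(), which on the printable-ASCII domain is exactly '0' ≤ c ≤ '9'):
-- on such strings int() is exactly the decimal left fold below (no sign/space/underscore can occur),
-- so this hand port of the final int(numero) is exact on the domain.
def pyIntOfDigits (cs : List Char) : Int :=
  cs.foldl (fun a c => 10 * a + ((c.toNat : Int) - 48)) 0

def extraer_cantidad_productos (estado : String) : Int :=
  -- numero = ""; for i in estado: if i.isnumeric(): numero += i
  let numero : List Char :=
    estado.toList.foldl (fun acc c => if PySem.Chars.isdigit c then acc ++ [c] else acc) []
  -- n_productos = int(numero) if numero else 0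
  let n_productos : Int := if numero.isEmpty then 0 else pyIntOfDigits numero
  n_productos + 1

-- ===== PORT B =====
def extraer_cantidad_productos_alt (estado : String) : Int :=
  -- num = 0; for i in estado: if i.isnumeric(): num = num*10 + int(i); return num + 1
  (estado.toList.foldl
    (fun num c => if PySem.Chars.isdigit c then num * 10 + ((c.toNat : Int) - 48) else num) 0) + 1

-- ===== PRECONDITION & SPEC =====
def Spec_extraer_cantidad_productos (estado : String) (out : Int) : Prop := out = extraer_cantidad_productos_alt estado
instance (estado : String) (out : Int) : Decidable (Spec_extraer_cantidad_productos estado out) := by unfold Spec_extraer_cantidad_productos; infer_instance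

-- ===== CLAIM (what is proved, stated in full; the proofs are below) =====
def Claim_equal_extraer_cantidad_productos : Prop := ∀ (estado : String), Dom_extraer_cantidad_productos estado → Spec_extraer_cantidad_productos estado (extraer_cantidad_productos estado)

-- ===== LEMMAS AND PROOFS =====

-- A's filtering loop builds exactly the digit sublist.
lemma numero_eq_filter (l : List Char) :
    l.foldl (fun acc c => if PySem.Chars.isdigit c then acc ++ [c] else acc) [] =
      l.filter PySem.Chars.isdigit := by
  simpa using PySem.List.foldl_append_if PySem.Chars.isdigit id l []

-- The empty-guarded parse of the digit sublist is the fold over it (the fold of [] is 0).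
lemma guarded_parse (ds : List Char) :
    (if ds.isEmpty then (0 : Int) else pyIntOfDigits ds) = pyIntOfDigits ds := by
  cases ds <;> simp [pyIntOfDigits]

-- ===== VERDICT (by name: the statement is the Claim_ definition above) =====
theorem extraer_cantidad_productos_spec : Claim_equal_extraer_cantidad_productos := by
  intro estado _
  unfold Spec_extraer_cantidad_productos extraer_cantidad_productos extraer_cantidad_productos_alt
  simp only [numero_eq_filter]
  rw [guarded_parse, pyIntOfDigits, List.foldl_filter]
  have h : (fun (x : Int) (y : Char) => if PySem.Chars.isdigit y = true then 10 * x + ((y.toNat : Int) - 48) else x)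
      = (fun (num : Int) (c : Char) => if PySem.Chars.isdigit c = true then num * 10 + ((c.toNat : Int) - 48) else num) := by
    funext a c
    split <;> ring
  rw [h]
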